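-- pv_equiv track=rewrite | github.com/teddydog23/PA_Searching | partB.py | can_link
-- ===== SOURCE A (Python) =====
-- from collections import defaultdict, deque, Counter
--
-- def can_link(u, v):
--     last4 = u[-4:]
--     count_last4 = Counter(last4)
--     count_v = Counter(v)
--     for char in count_last4:
--         if count_last4[char] > count_v.get(char, 0):
--             return False
--     return True
-- ===== SOURCE B (Python) =====
-- def can_link(u, v):
--     last4 = u[-4:]
--     need = {}
--     for c in last4:
--         need[c] = need.get(c, 0) + 1
--     remaining = len(last4)
--     if remaining == 0:
--         return True
--     for char in v:
--         if need.get(char, 0) > 0: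
--             need[char] = need[char] - 1
--             remaining -= 1
--             if remaining == 0:
--                 return True
--     return False
-- ===== Notes on version B (the rewrite author's own statement) =====
-- stated objective: faster
-- what changed: Instead of materialising Counter(v) and comparing counts over the keys of Counter(last4), B makes a single pass over v maintaining a shrinking need-dict and a total remaining count, returning True as soon as every required character is matched; it never counts all of v.
import Mathlib
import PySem

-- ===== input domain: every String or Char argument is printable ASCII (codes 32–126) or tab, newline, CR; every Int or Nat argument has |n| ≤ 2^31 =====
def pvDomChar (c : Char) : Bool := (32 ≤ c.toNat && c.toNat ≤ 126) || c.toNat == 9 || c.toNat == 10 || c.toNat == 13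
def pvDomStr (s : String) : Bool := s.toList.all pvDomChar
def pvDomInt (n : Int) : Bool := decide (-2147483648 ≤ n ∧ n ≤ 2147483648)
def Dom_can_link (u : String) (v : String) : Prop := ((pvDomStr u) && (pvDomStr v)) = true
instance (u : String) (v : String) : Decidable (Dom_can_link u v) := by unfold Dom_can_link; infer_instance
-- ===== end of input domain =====

-- B replaces A's two-Counter comparison by a single decrementing pass over v with early exit (same asymptotics; a timing run measured B faster).

-- ===== PORT A =====
-- 'for char in count_last4: if count_last4[char] > count_v.get(char, 0): return False' — loop over the counter's keys with early return.
-- count_last4[char] is a lookup of a present key (char ranges over the keys), so getD is exact here.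
def aKeyLoop (cl cv : PySem.Dict Char Int) : List Char → Bool
  | [] => true
  | c :: ks => if cl.getD c 0 > cv.getD c 0 then false else aKeyLoop cl cv ks

def can_link (u : String) (v : String) : Bool :=
  let last4 := PySem.List.slice u.toList (some (-4)) none
  let count_last4 := PySem.Dict.counter last4
  let count_v := PySem.Dict.counter v.toList
  aKeyLoop count_last4 count_v count_last4.keys

-- ===== PORT B =====
-- 'for char in v: if need.get(char,0) > 0: decrement need[char] and remaining; return True when remaining hits 0'
def bLoop (need : PySem.Dict Char Int) (remaining : Int) : List Char → Bool
  | [] => false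
  | c :: cs =>
    if need.getD c 0 > 0 then
      let need' := need.insert c (need.getD c 0 - 1)
      let r' := remaining - 1
      if r' = 0 then true else bLoop need' r' cs
    else bLoop need remaining cs

def can_link_alt (u : String) (v : String) : Bool :=
  let last4 := PySem.List.slice u.toList (some (-4)) none
  let need := last4.foldl (fun d c => d.insert c (d.getD c 0 + 1)) PySem.Dict.empty
  let remaining : Int := last4.length
  if remaining = 0 then true else bLoop need remaining v.toList

-- ===== PRECONDITION & SPEC =====
def Spec_can_link (u : String) (v : String) (out : Bool) : Prop := out = can_link_alt u v
instance (u : String) (v : String) (out : Bool) : Decidable (Spec_can_link u v out) := by unfold Spec_can_link; infer_instance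

-- ===== CLAIM (what is proved, stated in full; the proofs are below) =====
def Claim_equal_can_link : Prop := ∀ (u : String) (v : String), Dom_can_link u v → Spec_can_link u v (can_link u v)

-- ===== LEMMAS AND PROOFS =====

-- A's key loop is an 'all' over the keys
theorem aKeyLoop_eq_all (cl cv : PySem.Dict Char Int) (ks : List Char) :
    aKeyLoop cl cv ks = ks.all (fun c => !(cl.getD c 0 > cv.getD c 0)) := by
  induction ks with
  | nil => rfl
  | cons c ks ih => by_cases h : cl.getD c 0 > cv.getD c 0 <;> simp [aKeyLoop, h, ih]

-- A's result, characterised by counts: every char of last4 occurs in v at least as often as in last4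
theorem can_link_char (u v : String) :
    can_link u v
      = (PySem.List.slice u.toList (some (-4)) none).all
          (fun c => decide ((PySem.List.slice u.toList (some (-4)) none).count c ≤ v.toList.count c)) := by
  unfold can_link
  rw [aKeyLoop_eq_all, Bool.eq_iff_iff]
  simp only [List.all_eq_true, PySem.Dict.keys_counter, PySem.Set.mem_ofList,
    PySem.Dict.getD_counter, Bool.not_eq_true', decide_eq_false_iff_not, gt_iff_lt, not_lt,
    decide_eq_true_eq, Nat.cast_le]

-- B's loop, run with a dict that represents the multiset R and remaining = |R| ≠ 0,
-- decides the same count condition against the scanned list.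
theorem bLoop_char (cs : List Char) :
    ∀ (R : List Char) (need : PySem.Dict Char Int),
      (∀ c, need.getD c 0 = (R.count c : Int)) → R ≠ [] →
      bLoop need (R.length : Int) cs = R.all (fun c => decide (R.count c ≤ cs.count c)) := by
  induction cs with
  | nil =>
    intro R need h hR
    obtain ⟨c, hc⟩ := List.exists_mem_of_ne_nil R hR
    have hcnt : 1 ≤ R.count c := List.one_le_count_iff.mpr hc
    have hfalse : bLoop need (R.length : Int) [] = false := rfl
    rw [hfalse]
    symm
    simp only [List.all_eq_false, List.count_nil]
    exact ⟨c, hc, by simp only [decide_eq_true_eq]; omega⟩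
  | cons c cs ih =>
    intro R need h hR
    by_cases hpos : need.getD c 0 > 0
    · have hcR : c ∈ R := by
        have := h c
        rw [this] at hpos
        exact List.one_le_count_iff.mp (by exact_mod_cast hpos)
      have hlen : (R.erase c).length = R.length - 1 := List.length_erase_of_mem hcR
      have hcnt1 : 1 ≤ R.count c := List.one_le_count_iff.mpr hcR
      have hcount : ∀ d, (R.erase c).count d = R.count d - (if d = c then 1 else 0) := by
        intro d
        by_cases hd : d = c
        · subst hd; simp [List.count_erase_self]
        · simp [List.count_erase_of_ne hd, hd]
      have hneed' : ∀ d, (need.insert c (need.getD c 0 - 1)).getD d 0 = ((R.erase c).count d : Int) := by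
        intro d
        rw [PySem.Dict.getD_insert]
        by_cases hd : d = c
        · subst hd
          have h2 := hcount d
          rw [if_pos rfl, h]
          rw [if_pos rfl] at h2
          omega
        · rw [if_neg hd, h, hcount d, if_neg hd]
          simp
      by_cases hr : (R.length : Int) - 1 = 0
      · -- R has exactly one element, which is c
        have h1 : R.length = 1 := by omega
        obtain ⟨x, hx⟩ := List.length_eq_one_iff.mp h1
        subst hx
        have hcx : c = x := by simpa using hcR
        subst hcx
        simp [bLoop, hpos, List.count_cons_self]
      · have hrw : (R.length : Int) - 1 = ((R.erase c).length : Int) := by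
          rw [hlen]
          have : 1 ≤ R.length := List.length_pos_of_mem hcR
          omega
        have hne : R.erase c ≠ [] := by
          intro hnil
          rw [hnil] at hlen
          simp at hlen
          have : 1 ≤ R.length := List.length_pos_of_mem hcR
          omega
        have hstep : bLoop need (R.length : Int) (c :: cs)
            = bLoop (need.insert c (need.getD c 0 - 1)) ((R.length : Int) - 1) cs := by
          simp [bLoop, hpos, hr]
        rw [hstep, hrw, ih (R.erase c) _ hneed' hne, Bool.eq_iff_iff]
        simp only [List.all_eq_true, decide_eq_true_eq]
        constructor
        · intro hall d hd
          by_cases hdc : d = c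
          · rw [hdc, List.count_cons_self]
            by_cases hdR' : c ∈ R.erase c
            · have h3 := hall c hdR'
              rw [hcount, if_pos rfl] at h3
              omega
            · have h4 : (R.erase c).count c = 0 := List.count_eq_zero.mpr hdR'
              rw [hcount, if_pos rfl] at h4
              omega
          · have hdR' : d ∈ R.erase c := (List.mem_erase_of_ne hdc).mpr hd
            have h3 := hall d hdR'
            rw [hcount, if_neg hdc] at h3
            rw [List.count_cons_of_ne (Ne.symm hdc)]
            omega
        · intro hall d hd
          have hdR : d ∈ R := List.mem_of_mem_erase hd
          have h3 := hall d hdR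
          rw [hcount]
          by_cases hdc : d = c
          · rw [hdc, if_pos rfl]
            rw [hdc, List.count_cons_self] at h3
            omega
          · rw [if_neg hdc]
            rw [List.count_cons_of_ne (Ne.symm hdc)] at h3
            omega
    · have hc0 : R.count c = 0 := by
        have h1 := h c
        have hnonneg : (0 : Int) ≤ (R.count c : Int) := by positivity
        omega
      have hcR : c ∉ R := List.count_eq_zero.mp hc0
      have hstep : bLoop need (R.length : Int) (c :: cs) = bLoop need (R.length : Int) cs := by
        simp [bLoop, hpos]
      rw [hstep, ih R need h hR, Bool.eq_iff_iff]
      simp only [List.all_eq_true, decide_eq_true_eq]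
      constructor
      · intro hall d hd
        have hdc : d ≠ c := fun he => hcR (he ▸ hd)
        have h3 := hall d hd
        rw [List.count_cons_of_ne (Ne.symm hdc)]
        omega
      · intro hall d hd
        have hdc : d ≠ c := fun he => hcR (he ▸ hd)
        have h3 := hall d hd
        rw [List.count_cons_of_ne (Ne.symm hdc)] at h3
        omega

theorem can_link_alt_char (u v : String) :
    can_link_alt u v
      = (PySem.List.slice u.toList (some (-4)) none).all
          (fun c => decide ((PySem.List.slice u.toList (some (-4)) none).count c ≤ v.toList.count c)) := by
  show (if ((PySem.List.slice u.toList (some (-4)) none).length : Int) = 0 then true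
        else bLoop ((PySem.List.slice u.toList (some (-4)) none).foldl
                      (fun d c => d.insert c (d.getD c 0 + 1)) PySem.Dict.empty)
               ((PySem.List.slice u.toList (some (-4)) none).length : Int) v.toList) = _
  set last4 := PySem.List.slice u.toList (some (-4)) none with hl4
  by_cases h0 : last4 = []
  · simp [h0]
  · have hlen : ¬ ((last4.length : Int) = 0) := by
      intro h
      exact h0 (List.length_eq_zero_iff.mp (by exact_mod_cast h))
    rw [if_neg hlen, PySem.Dict.foldl_insert_getD_add_one_eq_counter]
    exact bLoop_char v.toList last4 _ (fun c => PySem.Dict.getD_counter _ _) h0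

-- ===== VERDICT (by name: the statement is the Claim_ definition above) =====
theorem can_link_spec : Claim_equal_can_link := by
  intro u v _
  unfold Spec_can_link
  rw [can_link_char, can_link_alt_char]
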